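-- pv_equiv track=rewrite | github.com/CHOUME-701/removable-sets-check | C_set0.py | tch
-- ===== SOURCE A (Python) =====
-- def reverse_graph(graph):
--     reversed_graph = {node: {} for node in graph}
--     for node, neighbors in graph.items():
--         for neighbor in neighbors:
--             if neighbor not in reversed_graph:
--                 reversed_graph[neighbor] = {}
--             reversed_graph[neighbor][node] = graph[node][neighbor]
--     return reversed_graph
--
-- def ch(DAG, vertices, reverse_DAG=None):  # 顶点集的邻居
--     return set(DAG[vertices].keys())
--
-- def pa(DAG, vertices, reverse_DAG=None):
--     if reverse_DAG is None:
--         reverse_DAG = reverse_graph(DAG)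
--     return set(reverse_DAG[vertices].keys())
--
-- def tch(DAG, vertices, reverse_DAG=None):
--     if reverse_DAG is None:
--         reverse_DAG = reverse_graph(DAG)
--     tch_value = set()
--     for i in ch(DAG, vertices, reverse_DAG):
--         tch_value = tch_value.union(pa(DAG, i, reverse_DAG))
--     tch_value.discard(vertices)
--     return tch_value
-- ===== SOURCE B (Python) =====
-- def tch(DAG, vertices, reverse_DAG=None):
--     # Co-parents of `vertices`: parents of its children. Never builds the
--     # reverse graph: when reverse_DAG is None it finds each child's parents
--     # by a direct forward scan over DAG instead.
--     children = DAG[vertices].keys()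
--     result = set()
--     if reverse_DAG is None:
--         for c in children:
--             for node, neighbors in DAG.items():
--                 if c in neighbors:
--                     result.add(node)
--     else:
--         for c in children:
--             result.update(reverse_DAG[c].keys())
--     result.discard(vertices)
--     return result
-- ===== Notes on version B (the rewrite author's own statement) =====
-- stated objective: alternative
-- what changed: B never materialises the reverse graph: with reverse_DAG=None it collects each child's parents by scanning DAG's adjacency entries directly (membership test per node) instead of constructing the full reversed dict-of-dicts and indexing it.
import Mathlib
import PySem

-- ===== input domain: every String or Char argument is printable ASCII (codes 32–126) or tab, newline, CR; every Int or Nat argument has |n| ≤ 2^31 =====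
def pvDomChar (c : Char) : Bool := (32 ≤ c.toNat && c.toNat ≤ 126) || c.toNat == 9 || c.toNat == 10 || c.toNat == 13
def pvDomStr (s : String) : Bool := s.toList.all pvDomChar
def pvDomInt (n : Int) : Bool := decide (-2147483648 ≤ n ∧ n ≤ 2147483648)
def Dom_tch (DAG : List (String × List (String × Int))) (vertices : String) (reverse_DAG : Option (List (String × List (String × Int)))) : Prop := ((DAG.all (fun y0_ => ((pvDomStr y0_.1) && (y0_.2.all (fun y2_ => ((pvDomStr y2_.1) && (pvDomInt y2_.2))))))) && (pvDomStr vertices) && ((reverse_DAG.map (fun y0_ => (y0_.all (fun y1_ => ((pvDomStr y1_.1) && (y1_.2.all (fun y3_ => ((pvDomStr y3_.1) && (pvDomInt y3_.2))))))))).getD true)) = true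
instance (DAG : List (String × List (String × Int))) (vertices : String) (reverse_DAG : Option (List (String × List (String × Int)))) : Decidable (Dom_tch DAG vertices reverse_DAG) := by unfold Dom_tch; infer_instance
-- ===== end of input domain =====

-- B avoids building the reverse graph (forward scans per child) — an alternative
-- decomposition, not claimed faster.  Equivalence is about the RETURN value;
-- neither version mutates its arguments.

-- ===== PORT A =====
-- decode the Python dict-of-dicts argument (shared input decoding)
def pvToGraph (l : List (String × List (String × Int))) : PySem.Dict String (PySem.Dict String Int) :=
  PySem.Dict.ofList (l.map (fun p => (p.1, PySem.Dict.ofList p.2)))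

-- reverse_graph(graph): builds {node: {}} then inserts edges.
-- 'graph[node][neighbor]' is ported as getD (present by construction: node is a
-- key of graph and neighbor a key of graph[node]); the other getD-with-empty
-- lookups likewise mirror subscripts that cannot raise there.
def reverseGraphPort (graph : PySem.Dict String (PySem.Dict String Int)) :
    PySem.Dict String (PySem.Dict String Int) :=
  let r0 := graph.keys.foldl (fun r n => r.insert n PySem.Dict.empty) PySem.Dict.empty
  graph.items.foldl (fun r p =>
    p.2.keys.foldl (fun r nb =>
      let r' := if r.contains nb then r else r.insert nb PySem.Dict.empty
      r'.insert nb ((r'.getD nb PySem.Dict.empty).insert p.1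
        ((graph.getD p.1 PySem.Dict.empty).getD nb 0))) r) r0

-- ch: set(DAG[vertices].keys()); DAG[vertices] raises KeyError when absent → Pre_
def chPort (graph : PySem.Dict String (PySem.Dict String Int)) (vertices : String) : PySem.Set String :=
  PySem.Set.ofList ((graph.getD vertices PySem.Dict.empty).keys)

-- pa: set(reverse_DAG[vertices].keys()); the subscript raises when absent → Pre_
def paPort (rd : PySem.Dict String (PySem.Dict String Int)) (vertices : String) : PySem.Set String :=
  PySem.Set.ofList ((rd.getD vertices PySem.Dict.empty).keys)

def tch (DAG : List (String × List (String × Int))) (vertices : String) (reverse_DAG : Option (List (String × List (String × Int)))) : List String :=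
  let graph := pvToGraph DAG
  let rd := match reverse_DAG with
    | none => reverseGraphPort graph
    | some r => pvToGraph r
  let tv := (chPort graph vertices).foldl
    (fun tv i => PySem.Set.union tv (paPort rd i)) PySem.Set.empty
  PySem.Set.discard tv vertices

-- ===== PORT B =====
def tch_alt (DAG : List (String × List (String × Int))) (vertices : String) (reverse_DAG : Option (List (String × List (String × Int)))) : List String :=
  let graph := pvToGraph DAG
  let children := (graph.getD vertices PySem.Dict.empty).keys
  let result := match reverse_DAG with
    | none =>
        children.foldl (fun acc c =>
          graph.items.foldl (fun acc p =>
            if p.2.contains c then PySem.Set.add acc p.1 else acc) acc) PySem.Set.empty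
    | some r =>
        let rd := pvToGraph r
        children.foldl (fun acc c =>
          PySem.Set.update acc ((rd.getD c PySem.Dict.empty).keys)) PySem.Set.empty
  PySem.Set.discard result vertices

-- ===== PRECONDITION & SPEC =====
-- Pre_ excludes exactly the KeyErrors: vertices must be a key of DAG, and when a
-- reverse_DAG is supplied every child of vertices must be one of its keys.
def Pre_tch (DAG : List (String × List (String × Int))) (vertices : String) (reverse_DAG : Option (List (String × List (String × Int)))) : Prop :=
  ((pvToGraph DAG).contains vertices
    && reverse_DAG.all (fun r =>
         ((pvToGraph DAG).getD vertices PySem.Dict.empty).keys.all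
           (fun c => (pvToGraph r).contains c))) = true
instance (DAG : List (String × List (String × Int))) (vertices : String) (reverse_DAG : Option (List (String × List (String × Int)))) : Decidable (Pre_tch DAG vertices reverse_DAG) := by unfold Pre_tch; infer_instance

def pvWitness_tch : (List (String × List (String × Int))) × String × (Option (List (String × List (String × Int)))) :=
  ([("x", [("b", 1), ("c", 2)]), ("p", [("c", 3)]), ("q", [("b", 4)])], "x", none)

def Spec_tch (DAG : List (String × List (String × Int))) (vertices : String) (reverse_DAG : Option (List (String × List (String × Int)))) (out : List String) : Prop := out = tch_alt DAG vertices reverse_DAG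
instance (DAG : List (String × List (String × Int))) (vertices : String) (reverse_DAG : Option (List (String × List (String × Int)))) (out : List String) : Decidable (Spec_tch DAG vertices reverse_DAG out) := by unfold Spec_tch; infer_instance

-- ===== CLAIM (what is proved, stated in full; the proofs are below) =====
def Claim_equal_tch : Prop := ∀ (DAG : List (String × List (String × Int))) (vertices : String) (reverse_DAG : Option (List (String × List (String × Int)))), Dom_tch DAG vertices reverse_DAG → Pre_tch DAG vertices reverse_DAG → Spec_tch DAG vertices reverse_DAG (tch DAG vertices reverse_DAG)

-- ===== LEMMAS AND PROOFS =====

theorem keys_insert_eq_add {κ ν : Type} [BEq κ] [LawfulBEq κ] (d : PySem.Dict κ ν) (k : κ) (v : ν) :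
    (d.insert k v).keys = PySem.Set.add d.keys k := by
  by_cases h : d.contains k = true
  · rw [PySem.Dict.keys_insert_of_contains _ _ h, PySem.Set.add_of_mem]
    exact (PySem.Dict.contains_iff_mem_keys _ _).mp h
  · rw [PySem.Dict.keys_insert_of_not_contains _ _ (by simpa using h), PySem.Set.add_of_not_mem]
    intro hm; exact h ((PySem.Dict.contains_iff_mem_keys _ _).mpr hm)

theorem getD_foldl_insert_empty (ns : List String) (r : PySem.Dict String (PySem.Dict String Int))
    (h : ∀ c, r.getD c PySem.Dict.empty = PySem.Dict.empty) (c : String) :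
    ((ns.foldl (fun r n => r.insert n PySem.Dict.empty) r).getD c PySem.Dict.empty) = PySem.Dict.empty := by
  induction ns generalizing r with
  | nil => exact h c
  | cons n rest ih =>
      refine ih _ (fun c => ?_)
      rw [PySem.Dict.getD_insert]
      split_ifs with hc
      · rfl
      · exact h c

theorem innerKeys (ks : List String) (n : String) (f : String → Int)
    (r : PySem.Dict String (PySem.Dict String Int)) (c : String) :
    ((ks.foldl (fun r nb =>
        let r' := if r.contains nb then r else r.insert nb PySem.Dict.empty
        r'.insert nb ((r'.getD nb PySem.Dict.empty).insert n (f nb))) r).getD c PySem.Dict.empty).keys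
    = if c ∈ ks then PySem.Set.add ((r.getD c PySem.Dict.empty).keys) n
      else ((r.getD c PySem.Dict.empty).keys) := by
  induction ks generalizing r with
  | nil => simp
  | cons nb rest ih =>
      have hstep : ∀ c', (((if r.contains nb then r else r.insert nb PySem.Dict.empty).insert nb
            (((if r.contains nb then r else r.insert nb PySem.Dict.empty).getD nb PySem.Dict.empty).insert n (f nb))).getD c' PySem.Dict.empty)
          = if c' = nb then (r.getD nb PySem.Dict.empty).insert n (f nb) else r.getD c' PySem.Dict.empty := by
        intro c'
        rw [PySem.Dict.getD_insert]
        split_ifs with hc hcont hcont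
        · rfl
        · rw [PySem.Dict.getD_insert_self,
            PySem.Dict.getD_of_not_contains _ _ (by simpa using hcont)]
        · rfl
        · exact PySem.Dict.getD_insert_of_ne _ _ _ hc
      simp only [List.foldl_cons, ih, hstep]
      by_cases hc : c = nb
      · subst hc
        simp [keys_insert_eq_add]
      · simp [hc, List.mem_cons]

theorem outerKeys (g : PySem.Dict String (PySem.Dict String Int))
    (L : List (String × PySem.Dict String Int)) (r : PySem.Dict String (PySem.Dict String Int))
    (hf : ∀ p ∈ L, ∀ c, p.1 ∉ ((r.getD c PySem.Dict.empty)).keys)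
    (hnd : (L.map Prod.fst).Nodup) (c : String) :
    ((L.foldl (fun r p =>
        p.2.keys.foldl (fun r nb =>
          let r' := if r.contains nb then r else r.insert nb PySem.Dict.empty
          r'.insert nb ((r'.getD nb PySem.Dict.empty).insert p.1
            ((g.getD p.1 PySem.Dict.empty).getD nb 0))) r) r).getD c PySem.Dict.empty).keys
    = ((r.getD c PySem.Dict.empty)).keys
      ++ (L.filter (fun p => p.2.contains c)).map (·.1) := by
  induction L generalizing r with
  | nil => simp
  | cons p0 rest ih =>
      simp only [List.foldl_cons]
      set r1 := p0.2.keys.foldl (fun r nb =>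
          let r' := if r.contains nb then r else r.insert nb PySem.Dict.empty
          r'.insert nb ((r'.getD nb PySem.Dict.empty).insert p0.1
            ((g.getD p0.1 PySem.Dict.empty).getD nb 0))) r with hr1
      have hkeys : ∀ c', ((r1.getD c' PySem.Dict.empty)).keys
          = ((r.getD c' PySem.Dict.empty)).keys
            ++ (if p0.2.contains c' then [p0.1] else []) := by
        intro c'
        rw [hr1, innerKeys]
        by_cases hm : c' ∈ p0.2.keys
        · rw [if_pos hm, if_pos ((PySem.Dict.contains_iff_mem_keys _ _).mpr hm),
            PySem.Set.add_of_not_mem (hf p0 (List.mem_cons_self) c')]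
        · rw [if_neg hm, if_neg (by simpa [PySem.Dict.contains_iff_mem_keys] using hm),
            List.append_nil]
      have hf' : ∀ p ∈ rest, ∀ c, p.1 ∉ ((r1.getD c PySem.Dict.empty)).keys := by
        intro p hp c'
        rw [hkeys c']
        simp only [List.mem_append]
        rintro (h | h)
        · exact hf p (List.mem_cons_of_mem _ hp) c' h
        · by_cases hb : p0.2.contains c' = true
          · have hpp : p.1 = p0.1 := by simpa [hb] using h
            have h1 : p0.1 ∉ rest.map Prod.fst := by
              rw [List.map_cons] at hnd; exact (List.nodup_cons.mp hnd).1
            exact h1 (hpp ▸ List.mem_map_of_mem hp)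
          · simp [hb] at h
      have hnd' : (rest.map Prod.fst).Nodup := by
        rw [List.map_cons] at hnd; exact (List.nodup_cons.mp hnd).2
      rw [ih r1 hf' hnd', hkeys c, List.filter_cons]
      by_cases hb : p0.2.contains c = true <;> simp [hb]

-- keys of the reversed graph's row c = the nodes whose adjacency dict mentions c
theorem reverseGraph_row_keys (graph : PySem.Dict String (PySem.Dict String Int))
    (hnd : graph.keys.Nodup) (c : String) :
    (((reverseGraphPort graph).getD c PySem.Dict.empty)).keys
    = (graph.items.filter (fun p => p.2.contains c)).map (·.1) := by
  have hr0 : ∀ c, ((graph.keys.foldl (fun r n => r.insert n PySem.Dict.empty)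
      PySem.Dict.empty).getD c PySem.Dict.empty) = PySem.Dict.empty :=
    getD_foldl_insert_empty _ _ (fun _ => rfl)
  unfold reverseGraphPort
  rw [outerKeys graph graph.items _ (fun p _ c => by rw [hr0 c]; simp) hnd c, hr0 c]
  simp

-- every row of a decoded dict-of-dicts has Nodup keys
theorem getD_pvToGraph_keys_nodup (l : List (String × List (String × Int))) (c : String) :
    (((pvToGraph l).getD c PySem.Dict.empty)).keys.Nodup := by
  have main : ∀ (L : List (String × PySem.Dict String Int))
      (d : PySem.Dict String (PySem.Dict String Int)),
      (∀ c, ((d.getD c PySem.Dict.empty)).keys.Nodup) →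
      (∀ p ∈ L, p.2.keys.Nodup) →
      ∀ c, (((L.foldl (fun d p => d.insert p.1 p.2) d).getD c PySem.Dict.empty)).keys.Nodup := by
    intro L
    induction L with
    | nil => intro d hd _ c; exact hd c
    | cons p rest ih =>
        intro d hd hL c
        simp only [List.foldl_cons]
        refine ih _ (fun c' => ?_) (fun q hq => hL q (List.mem_cons_of_mem _ hq)) c
        rw [PySem.Dict.getD_insert]
        split_ifs with hc
        · exact hL p (List.mem_cons_self)
        · exact hd c'
  have : pvToGraph l = (l.map (fun p => (p.1, PySem.Dict.ofList p.2))).foldl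
      (fun d p => d.insert p.1 p.2) PySem.Dict.empty := rfl
  rw [this]
  refine main _ _ (fun c => by simp) ?_ c
  intro p hp
  rcases List.mem_map.mp hp with ⟨q, _, rfl⟩
  exact PySem.Dict.nodup_keys_ofList _

-- a filtering loop that adds first components = folding add over the filtered firsts
theorem foldl_if_add (L : List (String × PySem.Dict String Int)) (pred : (String × PySem.Dict String Int) → Bool)
    (acc : PySem.Set String) :
    L.foldl (fun acc p => if pred p then PySem.Set.add acc p.1 else acc) acc
    = ((L.filter pred).map (·.1)).foldl PySem.Set.add acc := by
  induction L generalizing acc with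
  | nil => rfl
  | cons p rest ih =>
      simp only [List.foldl_cons, List.filter_cons]
      by_cases hb : pred p = true <;> simp [hb, ih]

theorem tch_main (DAG : List (String × List (String × Int))) (vertices : String)
    (reverse_DAG : Option (List (String × List (String × Int)))) :
    tch DAG vertices reverse_DAG = tch_alt DAG vertices reverse_DAG := by
  cases reverse_DAG with
  | some r =>
      show PySem.Set.discard ((chPort (pvToGraph DAG) vertices).foldl
          (fun tv i => PySem.Set.union tv (paPort (pvToGraph r) i)) PySem.Set.empty) vertices
        = PySem.Set.discard (((pvToGraph DAG).getD vertices PySem.Dict.empty).keys.foldl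
          (fun acc c => PySem.Set.update acc (((pvToGraph r).getD c PySem.Dict.empty).keys)) PySem.Set.empty) vertices
      unfold chPort
      rw [PySem.Set.ofList_eq_self_of_nodup _ (getD_pvToGraph_keys_nodup DAG vertices)]
      congr 1
      refine PySem.List.foldl_congr_mem _ _ _ _ ?_
      intro acc c _
      show PySem.Set.union acc (paPort (pvToGraph r) c) = _
      unfold paPort
      rw [PySem.Set.ofList_eq_self_of_nodup _ (getD_pvToGraph_keys_nodup r c)]
      rfl
  | none =>
      show PySem.Set.discard ((chPort (pvToGraph DAG) vertices).foldl
          (fun tv i => PySem.Set.union tv (paPort (reverseGraphPort (pvToGraph DAG)) i)) PySem.Set.empty) vertices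
        = PySem.Set.discard (((pvToGraph DAG).getD vertices PySem.Dict.empty).keys.foldl
          (fun acc c => (pvToGraph DAG).items.foldl (fun acc p =>
            if p.2.contains c then PySem.Set.add acc p.1 else acc) acc) PySem.Set.empty) vertices
      unfold chPort
      rw [PySem.Set.ofList_eq_self_of_nodup _ (getD_pvToGraph_keys_nodup DAG vertices)]
      congr 1
      refine PySem.List.foldl_congr_mem _ _ _ _ ?_
      intro acc c _
      show PySem.Set.union acc (paPort (reverseGraphPort (pvToGraph DAG)) c) = _
      unfold paPort
      have hndk : (pvToGraph DAG).keys.Nodup := by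
        unfold pvToGraph; exact PySem.Dict.nodup_keys_ofList _
      rw [reverseGraph_row_keys _ hndk c]
      have hnd : (((pvToGraph DAG).items.filter (fun p => p.2.contains c)).map (·.1)).Nodup := by
        have hsub : List.Sublist (((pvToGraph DAG).items.filter (fun p => p.2.contains c)).map (·.1))
            ((pvToGraph DAG).items.map (·.1)) := List.Sublist.map _ List.filter_sublist
        exact hndk.sublist hsub
      rw [PySem.Set.ofList_eq_self_of_nodup _ hnd, foldl_if_add]
      rfl

-- ===== VERDICT (by name: the statement is the Claim_ definition above) =====
theorem tch_spec : Claim_equal_tch := by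
  intro DAG vertices reverse_DAG _ _
  exact tch_main DAG vertices reverse_DAG
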